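-- pv_equiv track=rewrite | github.com/UnaiSan/olimp | rioenvalle.py | get_extreme
-- ===== SOURCE A (Python) =====
-- from typing import List, Tuple
--
-- def get_extreme(matrix: List[List[int]], max_: bool=True) -> Tuple[int, int, int]:
--     if max_:
--         func = max
--     else:
--         func = min
--     extremes = []
--     jextremes = []
--     for f in matrix:
--         extreme = func(f)
--         jextreme = f.index(extreme)
--         extremes.append(extreme)
--         jextremes.append(jextreme)
--     value = func(extremes)
--     ivalue = extremes.index(value)
--     jvalue = jextremes[ivalue]
--
--     return value, ivalue, jvalue
-- ===== SOURCE B (Python) =====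
-- from typing import List, Tuple
--
-- def get_extreme(matrix: List[List[int]], max_: bool = True) -> Tuple[int, int, int]:
--     best = None  # (value, i, j)
--     for i, row in enumerate(matrix):
--         if not row:
--             raise ValueError("empty row")
--         for j, v in enumerate(row):
--             if best is None or (best[0] < v if max_ else v < best[0]):
--                 best = (v, i, j)
--     if best is None:
--         raise ValueError("empty matrix")
--     return best
-- ===== Notes on version B (the rewrite author's own statement) =====
-- stated objective: simpler
-- what changed: Replaces the two-phase per-row extreme/index collection plus global .index lookups by a single row-major pass that keeps the running best (value, i, j), updating only on strict improvement so ties keep the first row-major occurrence.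
import Mathlib
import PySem

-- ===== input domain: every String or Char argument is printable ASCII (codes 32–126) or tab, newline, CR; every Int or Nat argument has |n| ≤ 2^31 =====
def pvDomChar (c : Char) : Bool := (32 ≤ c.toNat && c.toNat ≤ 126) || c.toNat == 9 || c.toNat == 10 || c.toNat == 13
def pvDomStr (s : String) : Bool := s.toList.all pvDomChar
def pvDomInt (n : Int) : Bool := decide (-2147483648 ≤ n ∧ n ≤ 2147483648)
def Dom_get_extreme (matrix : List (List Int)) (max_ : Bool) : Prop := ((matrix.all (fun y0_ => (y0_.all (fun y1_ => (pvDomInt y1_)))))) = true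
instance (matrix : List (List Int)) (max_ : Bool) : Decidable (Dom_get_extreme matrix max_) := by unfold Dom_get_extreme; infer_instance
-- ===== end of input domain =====

-- B changes the algorithm: one row-major pass keeping the running best (value, i, j)
-- with strict-improvement updates, instead of A's per-row extremes/indices lists plus
-- global extreme and .index lookups; objective: simpler.

-- ===== PORT A =====
def get_extreme (matrix : List (List Int)) (max_ : Bool) : Int × Int × Int :=
  -- func = max if max_ else min; max()/min() of an empty list raise (excluded by Pre_),
  -- modelled by PySem max?/min? returning none, read with .getD 0.
  let func : List Int → Option Int := fun xs =>
    if max_ then PySem.List.max? xs (fun y => y) else PySem.List.min? xs (fun y => y)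
  let st : List Int × List Int := matrix.foldl (fun acc f =>
    let extreme : Int := (func f).getD 0
    let jextreme : Int := (((PySem.List.index? f extreme).getD 0 : Nat) : Int)
    (acc.1 ++ [extreme], acc.2 ++ [jextreme])) ([], [])
  let extremes := st.1
  let jextremes := st.2
  let value : Int := (func extremes).getD 0
  let ivalue : Int := (((PySem.List.index? extremes value).getD 0 : Nat) : Int)
  let jvalue : Int := PySem.List.pyGetD jextremes ivalue 0
  (value, ivalue, jvalue)

-- ===== PORT B =====
def get_extreme_alt (matrix : List (List Int)) (max_ : Bool) : Int × Int × Int :=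
  -- single row-major pass; best is None until the first element is seen
  let best : Option (Int × Int × Int) :=
    (PySem.List.enumerate matrix 0).foldl (fun best p =>
      (PySem.List.enumerate p.2 0).foldl (fun best q =>
        match best with
        | none => some (q.2, p.1, q.1)
        | some (b, bi, bj) =>
          if (if max_ then b < q.2 else q.2 < b) then some (q.2, p.1, q.1)
          else some (b, bi, bj)) best) none
  -- best is None exactly when A raises (empty matrix, excluded by Pre_)
  match best with
  | some t => t
  | none => (0, 0, 0)

-- ===== PRECONDITION & SPEC =====
-- A raises ValueError on an empty matrix and on any empty row (max()/min() of an
-- empty list); B raises there too. Pre_ excludes exactly those inputs.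
def Pre_get_extreme (matrix : List (List Int)) (max_ : Bool) : Prop :=
  matrix ≠ [] ∧ ∀ row ∈ matrix, row ≠ []
instance (matrix : List (List Int)) (max_ : Bool) : Decidable (Pre_get_extreme matrix max_) := by
  unfold Pre_get_extreme; infer_instance

def pvWitness_get_extreme : List (List Int) × Bool := ([[1, 2], [3, 0]], true)

def Spec_get_extreme (matrix : List (List Int)) (max_ : Bool) (out : Int × Int × Int) : Prop := out = get_extreme_alt matrix max_
instance (matrix : List (List Int)) (max_ : Bool) (out : Int × Int × Int) : Decidable (Spec_get_extreme matrix max_ out) := by unfold Spec_get_extreme; infer_instance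

-- ===== CLAIM (what is proved, stated in full; the proofs are below) =====
def Claim_equal_get_extreme : Prop := ∀ (matrix : List (List Int)) (max_ : Bool), Dom_get_extreme matrix max_ → Pre_get_extreme matrix max_ → Spec_get_extreme matrix max_ (get_extreme matrix max_)

-- ===== LEMMAS AND PROOFS =====

-- "strictly better than the current best" (direction chosen by max_)
def pbetter (max_ : Bool) (b v : Int) : Bool := if max_ then b < v else v < b

-- the extreme value of a row, and the index of its first occurrence
def pext (max_ : Bool) (f : List Int) : Int :=
  ((if max_ then PySem.List.max? f (fun y => y) else PySem.List.min? f (fun y => y))).getD 0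
def pidx (max_ : Bool) (f : List Int) : Nat :=
  (PySem.List.index? f (pext max_ f)).getD 0

-- B's update step, on (value, payload) pairs
def pcombine {β : Type} (max_ : Bool) (acc : Option (Int × β)) (x : Int × β) : Option (Int × β) :=
  match acc with
  | none => some x
  | some (b, p) => if pbetter max_ b x.1 then some x else some (b, p)

theorem pbetter_trans {m : Bool} {a b c : Int} (h1 : pbetter m a b) (h2 : pbetter m b c) :
    pbetter m a c := by
  cases m <;> simp [pbetter] at * <;> omega

theorem not_pbetter_trans {m : Bool} {a b c : Int} (h1 : ¬ pbetter m a b = true)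
    (h2 : ¬ pbetter m b c = true) : ¬ pbetter m a c = true := by
  cases m <;> simp [pbetter] at * <;> omega

theorem pcombine_pcombine {β : Type} (max_ : Bool) (acc : Option (Int × β)) (z w : Int × β) :
    pcombine max_ (pcombine max_ acc z) w
      = pcombine max_ acc (if pbetter max_ z.1 w.1 then w else z) := by
  rcases acc with _ | ⟨b, p⟩
  · by_cases h : pbetter max_ z.1 w.1 = true <;> simp [pcombine, h]
  · by_cases hbz : pbetter max_ b z.1 = true
    · by_cases h : pbetter max_ z.1 w.1 = true
      · simp [pcombine, hbz, h, pbetter_trans hbz h]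
      · simp [pcombine, hbz, h]
    · by_cases h : pbetter max_ z.1 w.1 = true
      · by_cases hbw : pbetter max_ b w.1 = true <;> simp [pcombine, hbz, h, hbw]
      · simp [pcombine, hbz, h, not_pbetter_trans hbz h]

theorem foldl_max_comm (t : List Int) : ∀ x y, t.foldl max (max x y) = max x (t.foldl max y) := by
  induction t with
  | nil => intro x y; simp
  | cons z t ih =>
    intro x y
    simp only [List.foldl_cons]
    rw [max_assoc, ih]

theorem foldl_min_comm (t : List Int) : ∀ x y, t.foldl min (min x y) = min x (t.foldl min y) := by
  induction t with
  | nil => intro x y; simp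
  | cons z t ih =>
    intro x y
    simp only [List.foldl_cons]
    rw [min_assoc, ih]

theorem pext_singleton (max_ : Bool) (x : Int) : pext max_ [x] = x := by
  cases max_ <;> simp [pext, PySem.List.max?_id_cons, PySem.List.min?_id_cons]

theorem pext_cons (max_ : Bool) (x : Int) (t : List Int) (ht : t ≠ []) :
    pext max_ (x :: t) = if pbetter max_ x (pext max_ t) then pext max_ t else x := by
  rcases t with _ | ⟨y, t'⟩
  · exact absurd rfl ht
  · cases max_
    · simp only [pext, pbetter, PySem.List.min?_id_cons, Option.getD_some,
        List.foldl_cons, if_false]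
      rw [show min x y = min x y from rfl]
      have h := foldl_min_comm t' x y
      rw [h]
      rcases lt_or_ge (t'.foldl min y) x with h' | h'
      · simp [h', min_eq_right h'.le]
      · simp [not_lt.mpr h', min_eq_left h']
    · simp only [pext, pbetter, PySem.List.max?_id_cons, Option.getD_some,
        List.foldl_cons, if_true]
      have h := foldl_max_comm t' x y
      rw [h]
      rcases lt_or_ge x (t'.foldl max y) with h' | h'
      · simp [h', max_eq_right h'.le]
      · simp [not_lt.mpr h', max_eq_left h']

theorem pext_mem (max_ : Bool) (t : List Int) (ht : t ≠ []) : pext max_ t ∈ t := by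
  rcases t with _ | ⟨y, t'⟩
  · exact absurd rfl ht
  · cases max_
    · have h : PySem.List.min? (y :: t') (fun y => y) = some (pext false (y :: t')) := by
        simp [pext, PySem.List.min?_id_cons]
      exact PySem.List.min?_mem h
    · have h : PySem.List.max? (y :: t') (fun y => y) = some (pext true (y :: t')) := by
        simp [pext, PySem.List.max?_id_cons]
      exact PySem.List.max?_mem h

theorem index?_pidx (max_ : Bool) (t : List Int) (ht : t ≠ []) :
    PySem.List.index? t (pext max_ t) = some (pidx max_ t) := by
  have hmem := pext_mem max_ t ht
  have hs : (PySem.List.index? t (pext max_ t)).isSome := by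
    rw [PySem.List.index?_isSome_iff]; exact hmem
  rcases Option.isSome_iff_exists.mp hs with ⟨k, hk⟩
  have hp : pidx max_ t = k := by simp only [pidx]; rw [hk]; rfl
  rw [hk, hp]

theorem pidx_singleton (max_ : Bool) (x : Int) : pidx max_ [x] = 0 := by
  show (PySem.List.index? [x] (pext max_ [x])).getD 0 = 0
  rw [pext_singleton, PySem.List.index?_cons_self]; rfl

theorem pidx_cons (max_ : Bool) (x : Int) (t : List Int) (ht : t ≠ []) :
    pidx max_ (x :: t) = if pbetter max_ x (pext max_ t) then pidx max_ t + 1 else 0 := by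
  by_cases h : pbetter max_ x (pext max_ t) = true
  · have hne : x ≠ pext max_ t := by
      cases max_ <;> simp [pbetter] at h <;> omega
    have hx : pext max_ (x :: t) = pext max_ t := by rw [pext_cons max_ x t ht, if_pos h]
    have h2 : PySem.List.index? (x :: t) (pext max_ (x :: t)) = some (pidx max_ t + 1) := by
      rw [hx, PySem.List.index?_cons_of_ne t hne, index?_pidx max_ t ht]; rfl
    rw [if_pos h]
    show (PySem.List.index? (x :: t) (pext max_ (x :: t))).getD 0 = pidx max_ t + 1
    rw [h2]; rfl
  · have hx : pext max_ (x :: t) = x := by rw [pext_cons max_ x t ht, if_neg h]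
    rw [if_neg h]
    show (PySem.List.index? (x :: t) (pext max_ (x :: t))).getD 0 = 0
    rw [hx, PySem.List.index?_cons_self]; rfl

theorem pidx_lt_length (max_ : Bool) (t : List Int) (ht : t ≠ []) :
    pidx max_ t < t.length := by
  have h := index?_pidx max_ t ht
  rcases PySem.List.getElem_of_index?_eq_some h with ⟨hk, _, _⟩
  exact hk

theorem getElem_pidx (max_ : Bool) (t : List Int) (ht : t ≠ []) :
    t[pidx max_ t]'(pidx_lt_length max_ t ht) = pext max_ t := by
  have h := index?_pidx max_ t ht
  rcases PySem.List.getElem_of_index?_eq_some h with ⟨hk, heq, _⟩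
  exact heq

-- master lemma: folding pcombine over a nonempty list picks the element whose first
-- component is the first extreme of the first components
theorem pcombine_foldl {β : Type} (max_ : Bool) (d : Int × β) :
    ∀ (ts : List (Int × β)), ts ≠ [] → ∀ (acc : Option (Int × β)),
    ts.foldl (pcombine max_) acc
      = pcombine max_ acc (ts.getD (pidx max_ (ts.map (·.1))) d) := by
  intro ts
  induction ts with
  | nil => intro h; exact absurd rfl h
  | cons z rest ih =>
    intro _ acc
    rcases rest with _ | ⟨w, rest'⟩
    · simp [pidx_singleton]
    · have hne : (w :: rest') ≠ [] := by simp
      have hmapne : ((w :: rest').map (·.1)) ≠ [] := by simp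
      rw [List.foldl_cons, ih hne (pcombine max_ acc z)]
      rw [pcombine_pcombine]
      have hmap : ((z :: w :: rest').map (·.1)) = z.1 :: ((w :: rest').map (·.1)) := by simp
      rw [hmap, pidx_cons max_ z.1 _ hmapne]
      have hfst : ((w :: rest').getD (pidx max_ ((w :: rest').map (·.1))) d).1
          = pext max_ ((w :: rest').map (·.1)) := by
        have hlt : pidx max_ ((w :: rest').map (·.1)) < (w :: rest').length := by
          have := pidx_lt_length max_ _ hmapne
          simpa using this
        rw [List.getD_eq_getElem _ _ hlt]
        have h1 := getElem_pidx max_ _ hmapne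
        rw [List.getElem_map] at h1
        simpa using h1
      by_cases h : pbetter max_ z.1 (pext max_ ((w :: rest').map (·.1))) = true
      · rw [if_pos (by rw [hfst]; exact h), if_pos h]
        simp
      · rw [if_neg (by rw [hfst]; exact h), if_neg h]
        simp

-- summary of one row as B's inner loop computes it
def rowSummary (max_ : Bool) (i : Int) (row : List Int) : Int × Int × Int :=
  (pext max_ row, i, ((pidx max_ row : Nat) : Int))

theorem inner_fold (max_ : Bool) (i : Int) (row : List Int) (hrow : row ≠ [])
    (acc : Option (Int × Int × Int)) :
    (PySem.List.enumerate row 0).foldl (fun best q =>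
        match best with
        | none => some (q.2, i, q.1)
        | some (b, bi, bj) =>
          if (if max_ then b < q.2 else q.2 < b) then some (q.2, i, q.1)
          else some (b, bi, bj)) acc
      = pcombine max_ acc (rowSummary max_ i row) := by
  have hstep : (fun (best : Option (Int × Int × Int)) (q : Int × Int) =>
      match best with
      | none => some (q.2, i, q.1)
      | some (b, bi, bj) =>
        if (if max_ then b < q.2 else q.2 < b) then some (q.2, i, q.1)
        else some (b, bi, bj))
      = fun best q => pcombine max_ best (q.2, i, q.1) := by
    funext best q
    rcases best with _ | ⟨b, bi, bj⟩ <;> cases max_ <;> simp [pcombine, pbetter]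
  rw [hstep]
  have hmapfold : (PySem.List.enumerate row 0).foldl (fun best q => pcombine max_ best (q.2, i, q.1)) acc
      = ((PySem.List.enumerate row 0).map (fun q => (q.2, i, q.1))).foldl (pcombine max_) acc :=
    (List.foldl_map (f := fun (q : Int × Int) => ((q.2, i, q.1) : Int × Int × Int))
      (g := pcombine max_) (l := PySem.List.enumerate row 0) (init := acc)).symm
  rw [hmapfold]
  have htsne : ((PySem.List.enumerate row 0).map (fun q => ((q.2, i, q.1) : Int × Int × Int))) ≠ [] := by
    rcases row with _ | ⟨x, r⟩
    · exact absurd rfl hrow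
    · simp [PySem.List.enumerate_cons]
  rw [pcombine_foldl max_ (0, 0, 0) _ htsne acc]
  have hmapfst : ((PySem.List.enumerate row 0).map (fun q => ((q.2, i, q.1) : Int × Int × Int))).map (·.1) = row := by
    rw [List.map_map]
    exact PySem.List.map_snd_enumerate row 0
  rw [hmapfst]
  have hlt : pidx max_ row < row.length := pidx_lt_length max_ row hrow
  have hgd : ((PySem.List.enumerate row 0).map (fun q => ((q.2, i, q.1) : Int × Int × Int))).getD
      (pidx max_ row) (0, 0, 0) = rowSummary max_ i row := by
    rw [List.getD_eq_getElem?_getD, List.getElem?_map, PySem.List.getElem?_enumerate,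
      List.getElem?_eq_getElem hlt]
    simp [rowSummary, getElem_pidx max_ row hrow]
  rw [hgd]

theorem outer_fold (max_ : Bool) (matrix : List (List Int))
    (hrows : ∀ row ∈ matrix, row ≠ []) (acc : Option (Int × Int × Int)) :
    (PySem.List.enumerate matrix 0).foldl (fun best p =>
        (PySem.List.enumerate p.2 0).foldl (fun best q =>
          match best with
          | none => some (q.2, p.1, q.1)
          | some (b, bi, bj) =>
            if (if max_ then b < q.2 else q.2 < b) then some (q.2, p.1, q.1)
            else some (b, bi, bj)) best) acc
      = (PySem.List.enumerate matrix 0).foldl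
          (fun best p => pcombine max_ best (rowSummary max_ p.1 p.2)) acc := by
  apply PySem.List.foldl_congr_mem
  intro acc' p hp
  rcases (PySem.List.mem_enumerate_iff matrix 0 p).mp hp with ⟨k, hk, rfl⟩
  exact inner_fold max_ _ _ (hrows _ (List.getElem_mem hk)) acc'

theorem A_fold (max_ : Bool) :
    ∀ (matrix : List (List Int)) (e j : List Int),
    matrix.foldl (fun (acc : List Int × List Int) f =>
        let extreme : Int := ((if max_ then PySem.List.max? f (fun y => y)
          else PySem.List.min? f (fun y => y))).getD 0
        let jextreme : Int := (((PySem.List.index? f extreme).getD 0 : Nat) : Int)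
        (acc.1 ++ [extreme], acc.2 ++ [jextreme])) (e, j)
      = (e ++ matrix.map (pext max_), j ++ matrix.map (fun f => ((pidx max_ f : Nat) : Int))) := by
  intro matrix
  induction matrix with
  | nil => intro e j; simp
  | cons f t ih =>
    intro e j
    simp only [List.foldl_cons, List.map_cons]
    rw [ih]
    simp [pext, pidx, List.append_assoc]

theorem alt_eq (matrix : List (List Int)) (max_ : Bool) (hpre : Pre_get_extreme matrix max_) :
    get_extreme_alt matrix max_
      = (let es := matrix.map (pext max_)
         let K := pidx max_ es
         (pext max_ es, (K : Int), ((pidx max_ (matrix.getD K []) : Nat) : Int))) := by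
  obtain ⟨hne, hrows⟩ := hpre
  unfold get_extreme_alt
  rw [outer_fold max_ matrix hrows none]
  have hmapfold : (PySem.List.enumerate matrix 0).foldl
        (fun best p => pcombine max_ best (rowSummary max_ p.1 p.2)) none
      = ((PySem.List.enumerate matrix 0).map (fun p => rowSummary max_ p.1 p.2)).foldl
          (pcombine max_) none :=
    (List.foldl_map (f := fun (p : Int × List Int) => rowSummary max_ p.1 p.2)
      (g := pcombine max_) (l := PySem.List.enumerate matrix 0) (init := none)).symm
  rw [hmapfold]
  have htsne : ((PySem.List.enumerate matrix 0).map (fun p => rowSummary max_ p.1 p.2)) ≠ [] := by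
    rcases matrix with _ | ⟨x, r⟩
    · exact absurd rfl hne
    · simp [PySem.List.enumerate_cons]
  rw [pcombine_foldl max_ (0, 0, 0) _ htsne none]
  have hmapfst : ((PySem.List.enumerate matrix 0).map (fun p => rowSummary max_ p.1 p.2)).map (·.1)
      = matrix.map (pext max_) := by
    rw [List.map_map]
    have h2 : ((fun x => x.1) ∘ fun (p : Int × List Int) => rowSummary max_ p.1 p.2)
        = (pext max_) ∘ (fun p => p.2) := rfl
    rw [h2, ← List.map_map]
    rw [PySem.List.map_snd_enumerate]
  rw [hmapfst]
  have hesne : matrix.map (pext max_) ≠ [] := by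
    rcases matrix with _ | _
    · exact absurd rfl hne
    · simp
  have hlt : pidx max_ (matrix.map (pext max_)) < matrix.length := by
    have := pidx_lt_length max_ _ hesne
    simpa using this
  have hgd : ((PySem.List.enumerate matrix 0).map (fun p => rowSummary max_ p.1 p.2)).getD
      (pidx max_ (matrix.map (pext max_))) (0, 0, 0)
      = rowSummary max_ ((pidx max_ (matrix.map (pext max_)) : Nat) : Int)
          (matrix[pidx max_ (matrix.map (pext max_))]'hlt) := by
    rw [List.getD_eq_getElem?_getD, List.getElem?_map, PySem.List.getElem?_enumerate,
      List.getElem?_eq_getElem hlt]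
    simp
  rw [hgd]
  have hval : pext max_ (matrix[pidx max_ (matrix.map (pext max_))]'hlt)
      = pext max_ (matrix.map (pext max_)) := by
    have h1 := getElem_pidx max_ (matrix.map (pext max_)) hesne
    rw [List.getElem_map] at h1
    exact h1
  have hgd2 : matrix.getD (pidx max_ (matrix.map (pext max_))) []
      = matrix[pidx max_ (matrix.map (pext max_))]'hlt := List.getD_eq_getElem _ _ hlt
  simp only [pcombine, rowSummary, hval, hgd2]

theorem a_eq (matrix : List (List Int)) (max_ : Bool) (hpre : Pre_get_extreme matrix max_) :
    get_extreme matrix max_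
      = (let es := matrix.map (pext max_)
         let K := pidx max_ es
         (pext max_ es, (K : Int), ((pidx max_ (matrix.getD K []) : Nat) : Int))) := by
  obtain ⟨hne, hrows⟩ := hpre
  unfold get_extreme
  simp only []
  rw [A_fold max_ matrix [] []]
  simp only [List.nil_append]
  set es := matrix.map (pext max_) with hes
  have hesne : es ≠ [] := by
    rcases matrix with _ | _
    · exact absurd rfl hne
    · simp [hes]
  set K := pidx max_ es with hK
  have hlt : K < matrix.length := by
    have := pidx_lt_length max_ _ hesne
    simpa [hes] using this
  have hval : ((if max_ then PySem.List.max? es (fun y => y)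
      else PySem.List.min? es (fun y => y))).getD 0 = pext max_ es := by rfl
  rw [hval]
  have hidx : PySem.List.index? es (pext max_ es) = some K := index?_pidx max_ es hesne
  rw [hidx]
  simp only [Option.getD_some]
  have hj : PySem.List.pyGetD (matrix.map (fun f => ((pidx max_ f : Nat) : Int))) ((K : Nat) : Int) 0
      = ((pidx max_ (matrix.getD K []) : Nat) : Int) := by
    rw [PySem.List.pyGetD_natCast]
    rw [List.getD_eq_getElem _ _ (by simpa using hlt)]
    rw [List.getElem_map]
    rw [List.getD_eq_getElem _ _ hlt]
  rw [hj]

-- ===== VERDICT (by name: the statement is the Claim_ definition above) =====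
theorem get_extreme_spec : Claim_equal_get_extreme := by
  intro matrix max_ _hdom hpre
  unfold Spec_get_extreme
  rw [a_eq matrix max_ hpre, alt_eq matrix max_ hpre]
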